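-- pv_equiv track=rewrite | github.com/pypi-data/pypi-mirror-401 | packages/code-discovery/code_discovery-0.2.3-py3-none-any.whl/parsers/dotnet_parser.py | _split_generic_arguments
-- ===== SOURCE A (Python) =====
-- from typing import List, Optional, Dict, Any, Tuple
--
-- def _split_generic_arguments(generic_args: str) -> List[str]:
--     """Split generic arguments while handling nested generics."""
--     parts: List[str] = []
--     current: List[str] = []
--     depth = 0
--
--     for char in generic_args:
--         if char == ',' and depth == 0:
--             parts.append(''.join(current).strip())
--             current = []
--             continue
--
--         current.append(char)
--         if char == '<':
--             depth += 1
--         elif char == '>':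
--             depth = max(0, depth - 1)
--
--     if current:
--         parts.append(''.join(current).strip())
--
--     return [part for part in parts if part]
-- ===== SOURCE B (Python) =====
-- from typing import List, Optional, Tuple
--
-- def _take_one(s: str) -> Tuple[str, Optional[str]]:
--     """Find the first top-level comma; return (piece before it, remainder after it) or (s, None)."""
--     depth = 0
--     for i, ch in enumerate(s):
--         if ch == ',' and depth == 0:
--             return s[:i], s[i + 1:]
--         if ch == '<':
--             depth += 1
--         elif ch == '>':
--             depth = max(0, depth - 1)
--     return s, None
--
-- def _split_generic_arguments(generic_args: str) -> List[str]:
--     """Repeatedly peel off the first top-level argument from the front of the string."""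
--     out: List[str] = []
--     rest: Optional[str] = generic_args
--     while rest is not None:
--         head, rest = _take_one(rest)
--         head = head.strip()
--         if head:
--             out.append(head)
--     return out
-- ===== Notes on version B (the rewrite author's own statement) =====
-- stated objective: alternative
-- what changed: A is one left-to-right fold over the characters with a (parts, current, depth) accumulator; B is a head/tail decomposition: a helper locates the first top-level comma and splits the string there, and a driver loop repeatedly peels one argument off the front and continues on the remainder.
import Mathlib
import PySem

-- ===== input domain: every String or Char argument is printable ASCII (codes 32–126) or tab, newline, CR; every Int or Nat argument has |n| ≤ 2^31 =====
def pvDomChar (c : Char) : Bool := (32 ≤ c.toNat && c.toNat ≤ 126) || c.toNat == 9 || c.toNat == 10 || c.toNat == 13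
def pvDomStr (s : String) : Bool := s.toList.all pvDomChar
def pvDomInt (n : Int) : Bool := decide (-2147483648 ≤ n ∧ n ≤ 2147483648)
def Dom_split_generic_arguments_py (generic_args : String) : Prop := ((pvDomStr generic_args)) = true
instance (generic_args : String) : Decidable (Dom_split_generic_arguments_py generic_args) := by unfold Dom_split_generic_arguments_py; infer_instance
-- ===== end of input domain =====

-- B replaces A's single fold with a (parts, current, depth) accumulator by a head/tail
-- decomposition: find the first top-level comma, peel one argument off the front, repeat
-- on the remainder (objective: alternative decomposition, same cost; return value only).

-- ===== PORT A =====
-- state: (parts, current, depth)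
def pvStepA (st : List String × List Char × Int) (c : Char) : List String × List Char × Int :=
  if c = ',' ∧ st.2.2 = 0 then
    (st.1 ++ [PySem.Str.strip (String.ofList st.2.1)], [], st.2.2)
  else
    (st.1, st.2.1 ++ [c],
      if c = '<' then st.2.2 + 1 else if c = '>' then max 0 (st.2.2 - 1) else st.2.2)

def split_generic_arguments_py (generic_args : String) : List String :=
  let st := generic_args.toList.foldl pvStepA ([], [], 0)
  let parts := if st.2.1 ≠ [] then st.1 ++ [PySem.Str.strip (String.ofList st.2.1)] else st.1
  parts.filter (fun p => p != "")

-- ===== PORT B =====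
-- _take_one: scan for the first top-level comma; (piece before it, some remainder) or (whole, none)
def pvTakeOne : List Char → Int → List Char × Option (List Char)
  | [], _ => ([], none)
  | c :: r, d =>
    if c = ',' ∧ d = 0 then ([], some r)
    else
      let p := pvTakeOne r (if c = '<' then d + 1 else if c = '>' then max 0 (d - 1) else d)
      (c :: p.1, p.2)

-- termination of the driver loop: the remainder is strictly shorter
theorem pvTakeOne_rest_lt (s : List Char) (d : Int) (r : List Char)
    (h : (pvTakeOne s d).2 = some r) : r.length < s.length := by
  induction s generalizing d with
  | nil => simp [pvTakeOne] at h
  | cons c t ih =>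
    by_cases hc : c = ',' ∧ d = 0
    · rw [show pvTakeOne (c :: t) d = ([], some t) by simp [pvTakeOne, hc]] at h
      cases h
      simp
    · rw [show (pvTakeOne (c :: t) d).2
          = (pvTakeOne t (if c = '<' then d + 1 else if c = '>' then max 0 (d - 1) else d)).2 by
        simp [pvTakeOne, hc]] at h
      have := ih _ h
      simp only [List.length_cons]
      omega

-- the driver: peel one argument, strip, keep if nonempty, continue on the remainder
def pvCollect (s : List Char) : List String :=
  match hr : pvTakeOne s 0 with
  | (hd, none) =>
      if PySem.Str.strip (String.ofList hd) ≠ "" then [PySem.Str.strip (String.ofList hd)] else []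
  | (hd, some r) =>
      (if PySem.Str.strip (String.ofList hd) ≠ "" then [PySem.Str.strip (String.ofList hd)] else [])
        ++ pvCollect r
termination_by s.length
decreasing_by exact pvTakeOne_rest_lt s 0 r (by rw [hr])

def split_generic_arguments_py_alt (generic_args : String) : List String :=
  pvCollect generic_args.toList

-- ===== PRECONDITION & SPEC =====
def Spec_split_generic_arguments_py (generic_args : String) (out : List String) : Prop := out = split_generic_arguments_py_alt generic_args
instance (generic_args : String) (out : List String) : Decidable (Spec_split_generic_arguments_py generic_args out) := by unfold Spec_split_generic_arguments_py; infer_instance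

-- ===== CLAIM (what is proved, stated in full; the proofs are below) =====
def Claim_equal_split_generic_arguments_py : Prop := ∀ (generic_args : String), Dom_split_generic_arguments_py generic_args → Spec_split_generic_arguments_py generic_args (split_generic_arguments_py generic_args)

-- ===== LEMMAS AND PROOFS =====

def pvEmit (x : String) : List String := if x ≠ "" then [x] else []

-- A's flush + filter, as a function of the final state
def pvFinishA (st : List String × List Char × Int) : List String :=
  (if st.2.1 ≠ [] then st.1 ++ [PySem.Str.strip (String.ofList st.2.1)] else st.1).filter
    (fun p => p != "")

-- B generalized over a prefix already consumed into A's `current` and a running depth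
def pvGen (cur s : List Char) (d : Int) : List String :=
  match pvTakeOne s d with
  | (h, none) => pvEmit (PySem.Str.strip (String.ofList (cur ++ h)))
  | (h, some r) => pvEmit (PySem.Str.strip (String.ofList (cur ++ h))) ++ pvCollect r

theorem pvFilter_singleton (x : String) : [x].filter (fun p => p != "") = pvEmit x := by
  by_cases h : x = ""
  · simp [List.filter, pvEmit, h]
  · have hb : (x == "") = false := beq_eq_false_iff_ne.mpr h
    simp [List.filter, pvEmit, h, bne, hb]

theorem pvFinishA_eq (parts : List String) (cur : List Char) (d : Int) :
    pvFinishA (parts, cur, d)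
      = parts.filter (fun p => p != "") ++ pvEmit (PySem.Str.strip (String.ofList cur)) := by
  unfold pvFinishA
  by_cases h : cur = []
  · subst h
    have hs : PySem.Str.strip (String.ofList []) = "" := by decide
    simp [hs, pvEmit]
  · rw [if_pos (by simpa using h), List.filter_append, pvFilter_singleton]

theorem pvGen_nil (cur : List Char) (d : Int) :
    pvGen cur [] d = pvEmit (PySem.Str.strip (String.ofList cur)) := by
  simp [pvGen, pvTakeOne]

theorem pvGen_empty (s : List Char) : pvGen [] s 0 = pvCollect s := by
  unfold pvGen
  rw [pvCollect]
  cases h : pvTakeOne s 0 with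
  | mk hd o =>
    cases o with
    | none => simp [pvEmit]
    | some r => simp [pvEmit]

theorem pvGen_comma (cur t : List Char) :
    pvGen cur (',' :: t) 0 = pvEmit (PySem.Str.strip (String.ofList cur)) ++ pvCollect t := by
  unfold pvGen
  rw [show pvTakeOne (',' :: t) 0 = ([], some t) by simp [pvTakeOne]]
  simp

theorem pvGen_cons (cur t : List Char) (c : Char) (d : Int) (hc : ¬ (c = ',' ∧ d = 0)) :
    pvGen cur (c :: t) d
      = pvGen (cur ++ [c]) t (if c = '<' then d + 1 else if c = '>' then max 0 (d - 1) else d) := by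
  unfold pvGen
  rw [show pvTakeOne (c :: t) d
      = (c :: (pvTakeOne t (if c = '<' then d + 1 else if c = '>' then max 0 (d - 1) else d)).1,
         (pvTakeOne t (if c = '<' then d + 1 else if c = '>' then max 0 (d - 1) else d)).2) by
    simp [pvTakeOne, hc]]
  cases h : pvTakeOne t (if c = '<' then d + 1 else if c = '>' then max 0 (d - 1) else d) with
  | mk hd o =>
    cases o with
    | none => simp
    | some r => simp

theorem pvMain (s : List Char) : ∀ (parts : List String) (cur : List Char) (d : Int),
    pvFinishA (s.foldl pvStepA (parts, cur, d))
      = parts.filter (fun p => p != "") ++ pvGen cur s d := by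
  induction s with
  | nil =>
    intro parts cur d
    simp [pvGen_nil, pvFinishA_eq]
  | cons c t ih =>
    intro parts cur d
    by_cases hc : c = ',' ∧ d = 0
    · obtain ⟨rfl, rfl⟩ := hc
      rw [List.foldl_cons,
        show pvStepA (parts, cur, 0) ','
          = (parts ++ [PySem.Str.strip (String.ofList cur)], [], 0) by simp [pvStepA],
        ih, pvGen_comma, pvGen_empty]
      simp [pvFilter_singleton]
    · rw [List.foldl_cons,
        show pvStepA (parts, cur, d) c
          = (parts, cur ++ [c],
             if c = '<' then d + 1 else if c = '>' then max 0 (d - 1) else d) by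
          simp [pvStepA, hc],
        ih, pvGen_cons cur t c d hc]

-- ===== VERDICT (by name: the statement is the Claim_ definition above) =====
theorem split_generic_arguments_py_spec : Claim_equal_split_generic_arguments_py := by
  intro s _
  unfold Spec_split_generic_arguments_py split_generic_arguments_py split_generic_arguments_py_alt
  have h := pvMain s.toList [] [] 0
  simp only [pvFinishA] at h
  rw [h, pvGen_empty]
  rfl
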